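-- pv_equiv track=rewrite | github.com/SABAGHhamed/Lateral_Interpretation_GUI | seismic_gui/tsp.py | split_lines_by_y
-- ===== SOURCE A (Python) =====
-- from collections import defaultdict
--
-- def split_lines_by_y(lines):
--     """
--     For each line in lines, group points by x, record min and max y values for each x,
--     and create new lines for min and max y. If min and max lines differ, mark the
--     original line for removal.
--     """
--     new_lines = []
--     removables = set()
--
--     for idx, line in enumerate(lines):
--         x_groups = defaultdict(list)
--         for x, y in line:
--             x_groups[x].append(y)
--
--         x_sorted = sorted(x_groups.keys())
--         min_line = [(x, min(x_groups[x])) for x in x_sorted]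
--         max_line = [(x, max(x_groups[x])) for x in x_sorted]
--
--         if min_line != max_line:
--             # Add both new lines
--             new_lines.append(min_line)
--             new_lines.append(max_line)
--             removables.add(idx)
--         else:
--             # No split needed, keep original line
--             new_lines.append(line)
--
--     # Filter out original lines that were split
--     final_lines = [line for idx, line in enumerate(lines) if idx not in removables]
--
--     # Include newly created lines
--     final_lines.extend([line for line in new_lines if line not in lines])
--
--     return final_lines
-- ===== SOURCE B (Python) =====
-- def split_lines_by_y(lines):
--     kept = []
--     extras = []
--     for line in lines:
--         xs = sorted({x for x, _ in line})
--         min_line = [(x, min(y for px, y in line if px == x)) for x in xs]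
--         max_line = [(x, max(y for px, y in line if px == x)) for x in xs]
--         if min_line == max_line:
--             kept.append(line)
--         else:
--             extras.append(min_line)
--             extras.append(max_line)
--     return kept + [l for l in extras if l not in lines]
-- ===== Notes on version B (the rewrite author's own statement) =====
-- stated objective: simpler
-- what changed: Per line, B drops A's defaultdict grouping and instead sorts the distinct x values and takes min/max of the y's filtered per x; the outer rebuild replaces A's enumerate/removables index set and two-phase re-scan by a single pass accumulating kept originals and extra min/max lines directly.
import Mathlib
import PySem

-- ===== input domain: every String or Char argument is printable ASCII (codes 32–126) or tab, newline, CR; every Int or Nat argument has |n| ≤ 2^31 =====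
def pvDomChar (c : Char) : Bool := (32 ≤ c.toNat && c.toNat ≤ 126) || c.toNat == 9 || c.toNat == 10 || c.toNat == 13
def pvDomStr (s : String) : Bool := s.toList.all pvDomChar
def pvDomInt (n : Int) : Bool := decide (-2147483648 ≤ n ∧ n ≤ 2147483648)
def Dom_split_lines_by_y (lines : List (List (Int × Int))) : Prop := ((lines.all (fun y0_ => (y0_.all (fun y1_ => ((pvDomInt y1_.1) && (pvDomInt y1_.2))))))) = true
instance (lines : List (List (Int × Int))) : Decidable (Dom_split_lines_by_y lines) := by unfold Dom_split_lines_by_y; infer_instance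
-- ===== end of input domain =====

-- B replaces A's per-line defaultdict grouping by sorting the distinct x's and filtering per x,
-- and A's removables-set/enumerate rebuild by a single pass with kept/extras accumulators (objective: simpler).

-- ===== PORT A =====
-- x_groups = defaultdict(list); for x, y in line: x_groups[x].append(y)
def pvGroupsA (line : List (Int × Int)) : PySem.Dict Int (List Int) :=
  line.foldl (fun d xy => d.insert xy.1 (d.getD xy.1 [] ++ [xy.2])) PySem.Dict.empty

-- min_line = [(x, min(x_groups[x])) for x in sorted(x_groups.keys())]
-- (the '.getD 0' after min?/max? only totalises: for x in keys the group is nonempty, so Python's min never raises)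
def pvMinLineA (line : List (Int × Int)) : List (Int × Int) :=
  (PySem.List.sorted (pvGroupsA line).keys (fun x => x) false).map
    (fun x => (x, (PySem.List.min? ((pvGroupsA line).getD x []) (fun y => y)).getD 0))

def pvMaxLineA (line : List (Int × Int)) : List (Int × Int) :=
  (PySem.List.sorted (pvGroupsA line).keys (fun x => x) false).map
    (fun x => (x, (PySem.List.max? ((pvGroupsA line).getD x []) (fun y => y)).getD 0))

def split_lines_by_y (lines : List (List (Int × Int))) : List (List (Int × Int)) :=
  -- the loop: state = (new_lines, removables)
  let st := (PySem.List.enumerate lines).foldl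
    (fun (acc : List (List (Int × Int)) × PySem.Set Int) p =>
      if pvMinLineA p.2 ≠ pvMaxLineA p.2 then
        (acc.1 ++ [pvMinLineA p.2, pvMaxLineA p.2], PySem.Set.add acc.2 p.1)
      else
        (acc.1 ++ [p.2], acc.2))
    ([], PySem.Set.empty)
  -- final_lines = [line for idx, line in enumerate(lines) if idx not in removables]
  (((PySem.List.enumerate lines).filter (fun p => decide (p.1 ∉ st.2))).map (fun p => p.2))
  -- final_lines.extend([line for line in new_lines if line not in lines])
    ++ st.1.filter (fun l => decide (l ∉ lines))

-- ===== PORT B =====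
-- xs = sorted({x for x, _ in line})
def pvXsB (line : List (Int × Int)) : List Int :=
  PySem.List.sorted (PySem.Set.ofList (line.map (fun p => p.1))) (fun x => x) false

-- min_line = [(x, min(y for px, y in line if px == x)) for x in xs]   ('.getD 0' only totalises)
def pvMinLineB (line : List (Int × Int)) : List (Int × Int) :=
  (pvXsB line).map
    (fun x => (x, (PySem.List.min? ((line.filter (fun p => p.1 == x)).map (fun p => p.2)) (fun y => y)).getD 0))

def pvMaxLineB (line : List (Int × Int)) : List (Int × Int) :=
  (pvXsB line).map
    (fun x => (x, (PySem.List.max? ((line.filter (fun p => p.1 == x)).map (fun p => p.2)) (fun y => y)).getD 0))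

def split_lines_by_y_alt (lines : List (List (Int × Int))) : List (List (Int × Int)) :=
  -- the loop: state = (kept, extras)
  let st := lines.foldl
    (fun (acc : List (List (Int × Int)) × List (List (Int × Int))) line =>
      if pvMinLineB line = pvMaxLineB line then
        (acc.1 ++ [line], acc.2)
      else
        (acc.1, acc.2 ++ [pvMinLineB line, pvMaxLineB line]))
    ([], [])
  -- return kept + [l for l in extras if l not in lines]
  st.1 ++ st.2.filter (fun l => decide (l ∉ lines))

-- ===== PRECONDITION & SPEC =====
def Spec_split_lines_by_y (lines : List (List (Int × Int))) (out : List (List (Int × Int))) : Prop := out = split_lines_by_y_alt lines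
instance (lines : List (List (Int × Int))) (out : List (List (Int × Int))) : Decidable (Spec_split_lines_by_y lines out) := by unfold Spec_split_lines_by_y; infer_instance

-- ===== CLAIM (what is proved, stated in full; the proofs are below) =====
def Claim_equal_split_lines_by_y : Prop := ∀ (lines : List (List (Int × Int))), Dom_split_lines_by_y lines → Spec_split_lines_by_y lines (split_lines_by_y lines)

-- ===== LEMMAS AND PROOFS =====

-- the dict loop's value at x is the ys whose x matches, in order
theorem pv_group_getD (line : List (Int × Int)) (d : PySem.Dict Int (List Int)) (x : Int) :
    (line.foldl (fun d xy => d.insert xy.1 (d.getD xy.1 [] ++ [xy.2])) d).getD x []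
      = d.getD x [] ++ (line.filter (fun p => p.1 == x)).map (fun p => p.2) := by
  induction line generalizing d with
  | nil => simp
  | cons a rest ih =>
    simp only [List.foldl_cons, ih, List.filter_cons]
    by_cases h : a.1 = x
    · simp [h]
    · simp [PySem.Dict.getD_insert, h, Ne.symm h]

-- the dict loop's keys are the distinct x's in first-occurrence order
theorem pv_group_keys (line : List (Int × Int)) (d : PySem.Dict Int (List Int)) :
    (line.foldl (fun d xy => d.insert xy.1 (d.getD xy.1 [] ++ [xy.2])) d).keys
      = line.foldl (fun s p => PySem.Set.add s p.1) d.keys := by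
  induction line generalizing d with
  | nil => rfl
  | cons a rest ih =>
    simp only [List.foldl_cons, ih]
    congr 1
    by_cases h : d.contains a.1 = true
    · rw [PySem.Dict.keys_insert_of_contains _ _ h, PySem.Set.add_eq_ite,
        if_pos ((PySem.Dict.contains_iff_mem_keys d a.1).mp h)]
    · rw [PySem.Dict.keys_insert_of_not_contains _ _ (by simpa using h), PySem.Set.add_eq_ite,
        if_neg (fun hm => h ((PySem.Dict.contains_iff_mem_keys d a.1).mpr hm))]

theorem pv_keys_eq (line : List (Int × Int)) :
    (pvGroupsA line).keys = PySem.Set.ofList (line.map (fun p => p.1)) := by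
  rw [pvGroupsA, pv_group_keys, PySem.Set.ofList_eq_foldl, List.foldl_map]
  rfl

theorem pv_min_eq (line : List (Int × Int)) : pvMinLineA line = pvMinLineB line := by
  rw [pvMinLineA, pvMinLineB, pvXsB, ← pv_keys_eq]
  apply List.map_congr_left
  intro x _
  rw [pvGroupsA, pv_group_getD]
  rfl

theorem pv_max_eq (line : List (Int × Int)) : pvMaxLineA line = pvMaxLineB line := by
  rw [pvMaxLineA, pvMaxLineB, pvXsB, ← pv_keys_eq]
  apply List.map_congr_left
  intro x _
  rw [pvGroupsA, pv_group_getD]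
  rfl

-- two entries of enumerate with the same index are the same entry
theorem pv_enum_fst_inj {α : Type} (xs : List α) (s : Int) (p q : Int × α)
    (hp : p ∈ PySem.List.enumerate xs s) (hq : q ∈ PySem.List.enumerate xs s)
    (h : p.1 = q.1) : p = q := by
  rw [PySem.List.mem_enumerate_iff] at hp hq
  obtain ⟨k, hk, rfl⟩ := hp
  obtain ⟨k', hk', rfl⟩ := hq
  have : k = k' := by omega
  subst this; rfl

-- filtering enumerate by a property of the element, then dropping indices, is filtering the list
theorem pv_enum_filter_snd {α : Type} (xs : List α) (s : Int) (q : α → Bool) :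
    ((PySem.List.enumerate xs s).filter (fun p => q p.2)).map (fun p => p.2) = xs.filter q := by
  induction xs generalizing s with
  | nil => rfl
  | cons a rest ih =>
    rw [PySem.List.enumerate_cons, List.filter_cons, List.filter_cons]
    by_cases h : q a = true
    · simp only [h, if_pos, List.map_cons, ih]
    · simp [h, ih]

-- flatMap of a snd-only function over enumerate
theorem pv_enum_flatMap {α β : Type} (xs : List α) (s : Int) (H : α → List β) :
    (PySem.List.enumerate xs s).flatMap (fun p => H p.2) = xs.flatMap H := by
  have h1 : (PySem.List.enumerate xs s).flatMap (fun p => H p.2)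
      = ((PySem.List.enumerate xs s).map (fun p => p.2)).flatMap H :=
    Eq.symm (List.flatMap_map _ _ _)
  rw [h1, PySem.List.map_snd_enumerate]

-- B's loop, split into its two independent accumulators
theorem pv_B_eq (lines : List (List (Int × Int))) :
    split_lines_by_y_alt lines
      = lines.filter (fun l => decide (pvMinLineB l = pvMaxLineB l))
        ++ (lines.flatMap (fun l => if pvMinLineB l = pvMaxLineB l then [] else [pvMinLineB l, pvMaxLineB l])).filter
             (fun l => decide (l ∉ lines)) := by
  simp only [split_lines_by_y_alt]
  rw [PySem.List.foldl_congr_mem _ _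
      (fun (acc : List (List (Int × Int)) × List (List (Int × Int))) line =>
        (if pvMinLineB line = pvMaxLineB line then acc.1 ++ [line] else acc.1,
         acc.2 ++ (if pvMinLineB line = pvMaxLineB line then [] else [pvMinLineB line, pvMaxLineB line]))) _
      (by intro acc x _; by_cases h : pvMinLineB x = pvMaxLineB x <;> simp [h])]
  rw [PySem.List.foldl_prod_mk
      (f := fun a line => if pvMinLineB line = pvMaxLineB line then a ++ [line] else a)
      (g := fun a line => a ++ (if pvMinLineB line = pvMaxLineB line then [] else [pvMinLineB line, pvMaxLineB line]))]
  rw [PySem.List.foldl_append_ite_eq_filter]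
  rw [PySem.List.foldl_append_eq_flatMap]
  simp

-- A's loop, split into its two independent accumulators
theorem pv_A_eq (lines : List (List (Int × Int))) :
    split_lines_by_y lines
      = lines.filter (fun l => decide (pvMinLineB l = pvMaxLineB l))
        ++ (lines.flatMap (fun l => if pvMinLineB l = pvMaxLineB l then [l] else [pvMinLineB l, pvMaxLineB l])).filter
             (fun l => decide (l ∉ lines)) := by
  simp only [split_lines_by_y, pv_min_eq, pv_max_eq]
  rw [PySem.List.foldl_congr_mem _ _
      (fun (acc : List (List (Int × Int)) × PySem.Set Int) p =>
        (acc.1 ++ (if pvMinLineB p.2 = pvMaxLineB p.2 then [p.2] else [pvMinLineB p.2, pvMaxLineB p.2]),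
         if pvMinLineB p.2 ≠ pvMaxLineB p.2 then PySem.Set.add acc.2 p.1 else acc.2)) _
      (by intro acc x _; by_cases h : pvMinLineB x.2 = pvMaxLineB x.2 <;> simp [h])]
  rw [PySem.List.foldl_prod_mk
      (f := fun (a : List (List (Int × Int))) (p : Int × List (Int × Int)) =>
        a ++ (if pvMinLineB p.2 = pvMaxLineB p.2 then [p.2] else [pvMinLineB p.2, pvMaxLineB p.2]))
      (g := fun (s : PySem.Set Int) (p : Int × List (Int × Int)) =>
        if pvMinLineB p.2 ≠ pvMaxLineB p.2 then PySem.Set.add s p.1 else s)]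
  rw [PySem.List.foldl_append_eq_flatMap]
  rw [pv_enum_flatMap lines 0 (fun l => if pvMinLineB l = pvMaxLineB l then [l] else [pvMinLineB l, pvMaxLineB l])]
  simp only []
  congr 1
  rw [List.filter_congr (q := fun p => decide (pvMinLineB p.2 = pvMaxLineB p.2)) ?_]
  · exact pv_enum_filter_snd lines 0 (fun l => decide (pvMinLineB l = pvMaxLineB l))
  · intro p hp
    rw [PySem.List.foldl_ite_eq_foldl_filter
        (p := fun (q : Int × List (Int × Int)) => pvMinLineB q.2 ≠ pvMaxLineB q.2)
        (f := fun (s : PySem.Set Int) (q : Int × List (Int × Int)) => PySem.Set.add s q.1)]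
    have hmem : p.1 ∈ List.foldl (fun s (q : Int × List (Int × Int)) => PySem.Set.add s q.1) PySem.Set.empty
        ((PySem.List.enumerate lines 0).filter (fun q => decide (pvMinLineB q.2 ≠ pvMaxLineB q.2)))
        ↔ pvMinLineB p.2 ≠ pvMaxLineB p.2 := by
      rw [PySem.Set.mem_foldl_add (f := fun (q : Int × List (Int × Int)) => q.1)]
      constructor
      · rintro (h | ⟨b, hb, hb1⟩)
        · exact absurd h (by simp [PySem.Set.empty])
        · have hbe := List.mem_of_mem_filter hb
          have := pv_enum_fst_inj lines 0 p b hp hbe hb1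
          subst this
          simpa using List.of_mem_filter hb
      · intro h
        exact Or.inr ⟨p, List.mem_filter.mpr ⟨hp, by simpa using h⟩, rfl⟩
    simp only [hmem]
    by_cases h : pvMinLineB p.2 = pvMaxLineB p.2 <;> simp [h]

theorem split_main (lines : List (List (Int × Int))) :
    split_lines_by_y lines = split_lines_by_y_alt lines := by
  rw [pv_A_eq, pv_B_eq, List.filter_flatMap, List.filter_flatMap]
  congr 1
  apply List.flatMap_congr
  intro l hl
  by_cases h : pvMinLineB l = pvMaxLineB l
  · simp [h, hl]
  · simp [h]

-- ===== VERDICT (by name: the statement is the Claim_ definition above) =====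
theorem split_lines_by_y_spec : Claim_equal_split_lines_by_y := by
  intro lines _
  unfold Spec_split_lines_by_y
  exact split_main lines
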